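-- pv_equiv track=rewrite | github.com/NicholasLiem/IF2124_TugasBesar_ParserNodeJs | FA.py | check_var
-- ===== SOURCE A (Python) =====
-- canBeFirstChar = ['a', 'b', 'c', 'd', 'e', 'f', 'g', 'h', 'i', 'j', 'k', 'l', 'm', 'n', 'o', 'p', 'q', 'r', 's', 't', 'u', 'v', 'w', 'x', 'y', 'z',
--                   'A', 'B', 'C', 'D', 'E', 'F', 'G', 'H', 'I', 'J', 'K', 'L', 'M', 'N', 'O', 'P', 'Q', 'R', 'S', 'T', 'U', 'V', 'W', 'X', 'Y', 'Z',
--                   '_', '$']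
--
-- def check_var(input):
--     flag = False
--     firstChar = input[0]
--     for char in canBeFirstChar:
--         if (firstChar == char):
--             flag = True
--     if (input == 'false' or input == 'true'):
--         flag = False
--     return flag
-- ===== SOURCE B (Python) =====
-- def check_var(input):
--     if input in ('true', 'false'):
--         return False
--     c = input[0]
--     return c == '_' or c == '$' or c.lower() != c.upper()
-- ===== Notes on version B (the rewrite author's own statement) =====
-- stated objective: alternative
-- what changed: Drops the 54-element table and the flag-accumulating scan entirely: B early-returns False for the two boolean literals, then decides letter-ness by case-mapping asymmetry (c.lower() != c.upper() holds exactly for ASCII letters) plus the two explicit symbols '_' and '$'.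
import Mathlib
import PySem

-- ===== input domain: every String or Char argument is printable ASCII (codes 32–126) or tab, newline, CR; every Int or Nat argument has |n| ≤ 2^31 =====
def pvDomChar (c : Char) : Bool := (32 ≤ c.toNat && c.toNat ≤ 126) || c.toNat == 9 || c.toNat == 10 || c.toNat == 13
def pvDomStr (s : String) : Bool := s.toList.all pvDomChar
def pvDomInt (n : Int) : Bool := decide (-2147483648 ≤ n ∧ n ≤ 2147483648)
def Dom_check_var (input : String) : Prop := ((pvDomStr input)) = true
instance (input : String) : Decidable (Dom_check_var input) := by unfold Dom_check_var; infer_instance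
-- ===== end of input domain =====

-- B drops A's 54-element table and flag scan: it early-returns False on the two boolean
-- literals and detects letters by case-mapping asymmetry (c.lower() != c.upper()).
-- Both raise IndexError on the empty string, excluded by Pre_.

-- ===== PORT A =====
def canBeFirstChar : List Char :=
  ['a', 'b', 'c', 'd', 'e', 'f', 'g', 'h', 'i', 'j', 'k', 'l', 'm',
   'n', 'o', 'p', 'q', 'r', 's', 't', 'u', 'v', 'w', 'x', 'y', 'z',
   'A', 'B', 'C', 'D', 'E', 'F', 'G', 'H', 'I', 'J', 'K', 'L', 'M',
   'N', 'O', 'P', 'Q', 'R', 'S', 'T', 'U', 'V', 'W', 'X', 'Y', 'Z',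
   '_', '$']

def check_var (input : String) : Bool :=
  match PySem.Str.pyGet? input 0 with
  | none => false  -- IndexError in Python; excluded by Pre_check_var
  | some firstChar =>
    let flag := canBeFirstChar.foldl (fun flag char => if firstChar == char then true else flag) false
    let flag := if input == "false" || input == "true" then false else flag
    flag

-- ===== PORT B =====
def check_var_alt (input : String) : Bool :=
  if input == "true" || input == "false" then false
  else
    match PySem.Str.pyGet? input 0 with
    | none => false  -- IndexError in Python; excluded by Pre_check_var
    | some c =>
      c == '_' || c == '$' || (PySem.Chars.lowerChar c != PySem.Chars.upperChar c)

-- ===== PRECONDITION & SPEC =====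
-- Pre_ excludes only the empty string, on which A (input[0]) raises IndexError.
def Pre_check_var (input : String) : Prop := input ≠ ""
instance (input : String) : Decidable (Pre_check_var input) := by unfold Pre_check_var; infer_instance
def pvWitness_check_var : String := ("x1")

def Spec_check_var (input : String) (out : Bool) : Prop := out = check_var_alt input
instance (input : String) (out : Bool) : Decidable (Spec_check_var input out) := by unfold Spec_check_var; infer_instance

-- ===== CLAIM =====
def Claim_equal_check_var : Prop := ∀ (input : String), Dom_check_var input → Pre_check_var input → Spec_check_var input (check_var input)

-- ===== LEMMAS AND PROOFS =====

theorem toNat_ofNat_small (n : Nat) (h : n < 55296) : (Char.ofNat n).toNat = n := by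
  rw [Char.toNat_ofNat, if_pos (Or.inl h)]

-- A's flag accumulator over a list is a running "any"
theorem foldl_flag (c : Char) (l : List Char) (b : Bool) :
    l.foldl (fun flag char => if c == char then true else flag) b = (b || l.any (c == ·)) := by
  induction l generalizing b with
  | nil => simp
  | cons x xs ih =>
    simp only [List.foldl_cons, List.any_cons, ih]
    cases h : c == x <;> simp

-- on the ASCII domain, case-mapping asymmetry characterises letters
theorem letter_lemma (c : Char) (h : c.toNat ≤ 126) :
    (PySem.Chars.lowerChar c != PySem.Chars.upperChar c)
      = (PySem.Chars.islower c || PySem.Chars.isupper c) := by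
  simp only [PySem.Chars.lowerChar, PySem.Chars.upperChar, PySem.Chars.islower, PySem.Chars.isupper]
  split_ifs with h1 h2 h2 <;>
    simp only [Bool.and_eq_true, decide_eq_true_eq, Char.le_def, UInt32.le_iff_toNat_le,
      Char.reduceVal, UInt32.reduceToNat,
      show ∀ d : Char, d.val.toNat = d.toNat from fun _ => rfl] at h1 h2 <;>
    rw [Bool.eq_iff_iff] <;>
    simp only [bne_iff_ne, ne_eq, Char.ext_iff, ← UInt32.toNat_inj, Bool.or_eq_true,
      Bool.and_eq_true, decide_eq_true_eq, Char.le_def, UInt32.le_iff_toNat_le,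
      Char.reduceVal, UInt32.reduceToNat,
      show ∀ d : Char, d.val.toNat = d.toNat from fun _ => rfl] <;>
    (try rw [toNat_ofNat_small _ (by omega)]) <;>
    (try rw [toNat_ofNat_small _ (by omega)]) <;>
    first
    | omega
    | (simp only [not_true, false_iff]; omega)

-- the table scan equals B's test, for first characters in the ASCII domain
theorem flag_eq (c : Char) (h : c.toNat ≤ 126) :
    canBeFirstChar.foldl (fun flag char => if c == char then true else flag) false
      = (c == '_' || c == '$' || (PySem.Chars.lowerChar c != PySem.Chars.upperChar c)) := by
  rw [foldl_flag, Bool.false_or, letter_lemma c h, Bool.eq_iff_iff]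
  simp only [canBeFirstChar, List.any_cons, List.any_nil, Bool.or_false, Bool.or_eq_true,
    beq_iff_eq, PySem.Chars.islower, PySem.Chars.isupper, Bool.and_eq_true, decide_eq_true_eq,
    Char.ext_iff, Char.le_def, ← UInt32.toNat_inj, UInt32.le_iff_toNat_le,
    Char.reduceVal, UInt32.reduceToNat]
  omega

-- ===== VERDICT =====
theorem check_var_spec : Claim_equal_check_var := by
  intro input hdom hpre
  unfold Spec_check_var check_var check_var_alt
  have hne : input.toList ≠ [] := fun h => hpre (String.toList_inj.mp (by rw [h]; rfl))
  cases hl : input.toList with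
  | nil => exact absurd hl hne
  | cons c cs =>
    have hg : PySem.Str.pyGet? input 0 = some c := by
      rw [show (0:Int) = ((0:Nat):Int) from rfl, PySem.Str.pyGet?_natCast, hl]; rfl
    have hc : c.toNat ≤ 126 := by
      have := hdom
      unfold Dom_check_var pvDomStr at this
      rw [hl] at this
      simp only [List.all_cons, Bool.and_eq_true, pvDomChar, Bool.or_eq_true,
        Bool.and_eq_true, decide_eq_true_eq, beq_iff_eq] at this
      omega
    rw [hg]
    simp only [flag_eq c hc]
    by_cases hf : input = "false" <;> by_cases ht : input = "true" <;>
      simp [hf, ht, Bool.or_comm]
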